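-- pv_equiv track=rewrite | github.com/r9134027-cmd/web-to-app | blockchain_analyzer.py | detect_blockchain_type
-- ===== SOURCE A (Python) =====
-- def detect_blockchain_type(domain: str) -> str:
--     """Detect the type of blockchain domain."""
--     domain_lower = domain.lower()
--
--     # ENS domains
--     if domain_lower.endswith('.eth'):
--         return 'ens'
--
--     # Unstoppable Domains
--     unstoppable_tlds = ['.crypto', '.nft', '.blockchain', '.bitcoin', '.wallet', '.x', '.888', '.dao', '.zil']
--     if any(domain_lower.endswith(tld) for tld in unstoppable_tlds):
--         return 'unstoppable'
--
--     # Traditional domains with crypto content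
--     return 'traditional'
-- ===== SOURCE B (Python) =====
-- _CLASS = {
--     'eth': 'ens',
--     'crypto': 'unstoppable', 'nft': 'unstoppable', 'blockchain': 'unstoppable',
--     'bitcoin': 'unstoppable', 'wallet': 'unstoppable', 'x': 'unstoppable',
--     '888': 'unstoppable', 'dao': 'unstoppable', 'zil': 'unstoppable',
-- }
--
--
-- def detect_blockchain_type(domain: str) -> str:
--     """Detect the type of blockchain domain.
--
--     Single backward scan: collect the label after the last dot and
--     classify it with one table lookup instead of ten endswith tests.
--     """
--     label = []
--     for ch in reversed(domain.lower()):
--         if ch == '.':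
--             return _CLASS.get(''.join(reversed(label)), 'traditional')
--         label.append(ch)
--     return 'traditional'
-- ===== Notes on version B (the rewrite author's own statement) =====
-- stated objective: alternative
-- what changed: Replaces ten endswith scans over a TLD list with a single backward scan that extracts the label after the last dot and classifies it by one table lookup.
import Mathlib
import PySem

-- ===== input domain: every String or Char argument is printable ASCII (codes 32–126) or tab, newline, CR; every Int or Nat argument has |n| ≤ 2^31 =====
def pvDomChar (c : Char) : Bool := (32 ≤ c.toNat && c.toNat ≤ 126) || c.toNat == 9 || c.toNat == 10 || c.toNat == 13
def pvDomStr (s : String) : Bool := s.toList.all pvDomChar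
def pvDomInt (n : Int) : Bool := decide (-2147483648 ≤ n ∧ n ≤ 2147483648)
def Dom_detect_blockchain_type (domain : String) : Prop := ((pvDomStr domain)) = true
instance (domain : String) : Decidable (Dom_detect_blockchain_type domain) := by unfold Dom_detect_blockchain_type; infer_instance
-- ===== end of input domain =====

-- B replaces A's ten endswith tests with one backward scan extracting the label after the
-- last dot and a single table lookup (objective: alternative algorithm, same exact result).

-- ===== PORT A =====
def pvUnstoppableTlds : List String :=
  [".crypto", ".nft", ".blockchain", ".bitcoin", ".wallet", ".x", ".888", ".dao", ".zil"]

def detect_blockchain_type (domain : String) : String :=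
  let domain_lower := PySem.Str.lower domain
  if PySem.Str.endswith domain_lower ".eth" then "ens"
  else if pvUnstoppableTlds.any (fun tld => PySem.Str.endswith domain_lower tld) then "unstoppable"
  else "traditional"

-- ===== PORT B =====
def pvClass : PySem.Dict String String :=
  PySem.Dict.ofList
    [("eth", "ens"), ("crypto", "unstoppable"), ("nft", "unstoppable"),
     ("blockchain", "unstoppable"), ("bitcoin", "unstoppable"), ("wallet", "unstoppable"),
     ("x", "unstoppable"), ("888", "unstoppable"), ("dao", "unstoppable"), ("zil", "unstoppable")]

-- Source B's loop over reversed(domain.lower()); acc holds the collected label chars in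
-- original order (it is Python's ''.join(reversed(label)) built incrementally).
def pvScan : List Char → List Char → String
  | [], _ => "traditional"
  | c :: rest, acc =>
    if c = '.' then pvClass.getD (String.ofList acc) "traditional"
    else pvScan rest (c :: acc)

def detect_blockchain_type_alt (domain : String) : String :=
  pvScan (PySem.Str.lower domain).toList.reverse []

-- ===== PRECONDITION & SPEC =====
def Spec_detect_blockchain_type (domain : String) (out : String) : Prop := out = detect_blockchain_type_alt domain
instance (domain : String) (out : String) : Decidable (Spec_detect_blockchain_type domain out) := by unfold Spec_detect_blockchain_type; infer_instance

-- ===== CLAIM (what is proved, stated in full; the proofs are below) =====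
def Claim_equal_detect_blockchain_type : Prop := ∀ (domain : String), Dom_detect_blockchain_type domain → Spec_detect_blockchain_type domain (detect_blockchain_type domain)

-- ===== LEMMAS AND PROOFS =====

theorem pvScan_no_dot (cs acc : List Char) (h : '.' ∉ cs) : pvScan cs acc = "traditional" := by
  induction cs generalizing acc with
  | nil => rfl
  | cons c rest ih =>
    simp only [List.mem_cons, not_or] at h
    simp [pvScan, Ne.symm h.1, ih _ h.2]

theorem pvScan_dot (pre rest acc : List Char) (h : '.' ∉ pre) :
    pvScan (pre ++ '.' :: rest) acc = pvClass.getD (String.ofList (pre.reverse ++ acc)) "traditional" := by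
  induction pre generalizing acc with
  | nil => simp [pvScan]
  | cons c pre' ih =>
    simp only [List.mem_cons, not_or] at h
    simp [pvScan, Ne.symm h.1, ih _ h.2]

theorem pvLastDot (l : List Char) (h : '.' ∈ l) :
    ∃ p t, l = p ++ '.' :: t ∧ '.' ∉ t := by
  induction l with
  | nil => simp at h
  | cons c rest ih =>
    by_cases hr : '.' ∈ rest
    · obtain ⟨p, t, hpt, hnt⟩ := ih hr
      exact ⟨c :: p, t, by simp [hpt], hnt⟩
    · rcases List.mem_cons.mp h with hc | hc
      · exact ⟨[], rest, by simp [hc.symm], hr⟩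
      · exact absurd hc hr

theorem pvTakeWhile_all (xs ys : List Char) (hx : '.' ∉ xs) :
    (xs ++ '.' :: ys).takeWhile (fun c => !(c == '.')) = xs := by
  induction xs with
  | nil => simp
  | cons a as ih =>
    simp only [List.mem_cons, not_or] at hx
    rw [List.cons_append, List.takeWhile_cons]
    simp [Ne.symm hx.1, ih hx.2]

-- suffix characterization: a dotted tld is a suffix of l iff its label equals the
-- label after l's last dot
theorem pvSuffix_iff (p t w : List Char) (ht : '.' ∉ t) (hw : '.' ∉ w) :
    ('.' :: w <:+ p ++ '.' :: t) ↔ w = t := by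
  constructor
  · rintro ⟨q, hq⟩
    have hrev : t.reverse ++ '.' :: p.reverse = w.reverse ++ '.' :: q.reverse := by
      have := congrArg List.reverse hq
      simpa using this.symm
    have h1 : '.' ∉ t.reverse := by simpa using ht
    have h2 : '.' ∉ w.reverse := by simpa using hw
    have e1 := pvTakeWhile_all t.reverse p.reverse h1
    have e2 := pvTakeWhile_all w.reverse q.reverse h2
    rw [hrev] at e1
    have : t.reverse = w.reverse := e1.symm.trans e2
    simpa using this.symm
  · rintro rfl
    exact ⟨p, rfl⟩

theorem pvNoDot_not_suffix (l w : List Char) (h : '.' ∉ l) : ¬ ('.' :: w <:+ l) := by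
  intro hs
  exact h (hs.subset (List.mem_cons_self ..))

theorem pvStr_beq_ofList (s : String) (t : List Char) :
    (s == String.ofList t) = decide (s.toList = t) := by
  rw [Bool.eq_iff_iff]
  simp [String.ext_iff]

theorem pvClass_getD (t : List Char) :
    pvClass.getD (String.ofList t) "traditional" =
      if ['e','t','h'] = t then "ens"
      else if ['c','r','y','p','t','o'] = t then "unstoppable"
      else if ['n','f','t'] = t then "unstoppable"
      else if ['b','l','o','c','k','c','h','a','i','n'] = t then "unstoppable"
      else if ['b','i','t','c','o','i','n'] = t then "unstoppable"
      else if ['w','a','l','l','e','t'] = t then "unstoppable"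
      else if ['x'] = t then "unstoppable"
      else if ['8','8','8'] = t then "unstoppable"
      else if ['d','a','o'] = t then "unstoppable"
      else if ['z','i','l'] = t then "unstoppable"
      else "traditional" := by
  have hitems : pvClass.items =
      [("eth", "ens"), ("crypto", "unstoppable"), ("nft", "unstoppable"),
       ("blockchain", "unstoppable"), ("bitcoin", "unstoppable"), ("wallet", "unstoppable"),
       ("x", "unstoppable"), ("888", "unstoppable"), ("dao", "unstoppable"), ("zil", "unstoppable")] := by
    rfl
  simp only [PySem.Dict.getD, PySem.Dict.get?, hitems, List.find?_cons, pvStr_beq_ofList]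
  split_ifs <;> simp_all

theorem pvEndswith_dot (l p t w : List Char) (hpt : l = p ++ '.' :: t) (hnt : '.' ∉ t)
    (hw : '.' ∉ w) : PySem.Chars.endswith l ('.' :: w) = decide (w = t) := by
  rw [Bool.eq_iff_iff, PySem.Chars.endswith_iff, hpt, decide_eq_true_eq]
  exact pvSuffix_iff p t w hnt hw

-- ===== VERDICT (by name: the statement is the Claim_ definition above) =====
set_option maxHeartbeats 2000000 in
theorem detect_blockchain_type_spec : Claim_equal_detect_blockchain_type := by
  intro domain _
  unfold Spec_detect_blockchain_type detect_blockchain_type detect_blockchain_type_alt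
  set l : List Char := (PySem.Str.lower domain).toList with hl
  by_cases hd : '.' ∈ l
  · obtain ⟨p, t, hpt, hnt⟩ := pvLastDot l hd
    have hrev : l.reverse = t.reverse ++ '.' :: p.reverse := by
      simpa using congrArg List.reverse hpt
    rw [hrev, pvScan_dot _ _ _ (by simpa using hnt)]
    simp only [List.reverse_reverse, List.append_nil, pvClass_getD]
    simp only [PySem.Str.endswith_eq, ← hl, pvUnstoppableTlds, List.any_cons, List.any_nil,
      Bool.or_eq_true]
    rw [show (".eth" : String).toList = '.' :: ['e','t','h'] from rfl,
        show (".crypto" : String).toList = '.' :: ['c','r','y','p','t','o'] from rfl,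
        show (".nft" : String).toList = '.' :: ['n','f','t'] from rfl,
        show (".blockchain" : String).toList = '.' :: ['b','l','o','c','k','c','h','a','i','n'] from rfl,
        show (".bitcoin" : String).toList = '.' :: ['b','i','t','c','o','i','n'] from rfl,
        show (".wallet" : String).toList = '.' :: ['w','a','l','l','e','t'] from rfl,
        show (".x" : String).toList = '.' :: ['x'] from rfl,
        show (".888" : String).toList = '.' :: ['8','8','8'] from rfl,
        show (".dao" : String).toList = '.' :: ['d','a','o'] from rfl,
        show (".zil" : String).toList = '.' :: ['z','i','l'] from rfl]
    rw [pvEndswith_dot l p t _ hpt hnt (by decide), pvEndswith_dot l p t _ hpt hnt (by decide),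
        pvEndswith_dot l p t _ hpt hnt (by decide), pvEndswith_dot l p t _ hpt hnt (by decide),
        pvEndswith_dot l p t _ hpt hnt (by decide), pvEndswith_dot l p t _ hpt hnt (by decide),
        pvEndswith_dot l p t _ hpt hnt (by decide), pvEndswith_dot l p t _ hpt hnt (by decide),
        pvEndswith_dot l p t _ hpt hnt (by decide), pvEndswith_dot l p t _ hpt hnt (by decide)]
    simp only [decide_eq_true_eq]
    split_ifs <;> simp_all
  · rw [pvScan_no_dot _ _ (by simpa using hd)]
    have hne : ∀ w : List Char, PySem.Chars.endswith l ('.' :: w) = false := fun w => by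
      rw [← Bool.not_eq_true, PySem.Chars.endswith_iff]
      exact pvNoDot_not_suffix l w hd
    simp only [PySem.Str.endswith_eq, ← hl, pvUnstoppableTlds, List.any_cons, List.any_nil]
    rw [show (".eth" : String).toList = '.' :: ['e','t','h'] from rfl,
        show (".crypto" : String).toList = '.' :: ['c','r','y','p','t','o'] from rfl,
        show (".nft" : String).toList = '.' :: ['n','f','t'] from rfl,
        show (".blockchain" : String).toList = '.' :: ['b','l','o','c','k','c','h','a','i','n'] from rfl,
        show (".bitcoin" : String).toList = '.' :: ['b','i','t','c','o','i','n'] from rfl,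
        show (".wallet" : String).toList = '.' :: ['w','a','l','l','e','t'] from rfl,
        show (".x" : String).toList = '.' :: ['x'] from rfl,
        show (".888" : String).toList = '.' :: ['8','8','8'] from rfl,
        show (".dao" : String).toList = '.' :: ['d','a','o'] from rfl,
        show (".zil" : String).toList = '.' :: ['z','i','l'] from rfl]
    simp [hne]
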